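-- pv_equiv track=rewrite | github.com/Ocean52-XIE/dsp_agent | src/workflow/eval/run_issue_analysis_eval.py | _collect_anchor_tokens
-- ===== SOURCE A (Python) =====
-- from typing import Any
--
-- def _collect_anchor_tokens(citations: list[dict[str, Any]]) -> list[str]:
--     """
--     从引用证据中提取可追踪锚点 token。
--
--     说明：
--     用于评估“回答是否引用了具体证据锚点”，而不仅是泛化描述。
--     """
--     tokens: list[str] = []
--     for item in citations:
--         path = str(item.get("path", "")).strip().lower()
--         title = str(item.get("title", "")).strip().lower()
--         section = str(item.get("section", "")).strip().lower()
--         symbol_name = str(item.get("symbol_name", "")).strip().lower()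
--         if path:
--             tokens.append(path)
--             tokens.append(path.split("/")[-1])
--             tokens.append(path.split("\\")[-1])
--         if title:
--             tokens.append(title)
--         if section:
--             tokens.append(section)
--         if symbol_name:
--             tokens.append(symbol_name)
--
--     deduped: list[str] = []
--     seen: set[str] = set()
--     for raw in tokens:
--         normalized = str(raw or "").strip().lower()
--         if len(normalized) < 3:
--             continue
--         if normalized in seen:
--             continue
--         seen.add(normalized)
--         deduped.append(normalized)
--     return deduped
-- ===== SOURCE B (Python) =====
-- from typing import Any
--
-- def _collect_anchor_tokens(citations: list[dict[str, Any]]) -> list[str]: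
--     """Record each token's first-occurrence position in a dict, then sort by position.
--
--     Instead of an ordered output list guarded by a seen-set, dedup order is
--     reconstructed at the end: `first` maps token -> position of its first sighting
--     (setdefault keeps the earliest), and the result is the tokens sorted by that
--     position — first-occurrence order, identical to A's output.
--     """
--     first: dict[str, int] = {}
--     position = 0
--     for item in citations:
--         for field in ("path", "title", "section", "symbol_name"):
--             value = str(item.get(field, "")).strip().lower()
--             if not value:
--                 continue
--             candidates = [value]
--             if field == "path":
--                 candidates.append(value.split("/")[-1])
--                 candidates.append(value.split("\\")[-1])
--             for cand in candidates:
--                 normalized = cand.strip().lower()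
--                 if len(normalized) >= 3:
--                     first.setdefault(normalized, position)
--                 position += 1
--     return [token for token, _ in sorted(first.items(), key=lambda kv: kv[1])]
-- ===== Notes on version B (the rewrite author's own statement) =====
-- stated objective: alternative
-- what changed: Instead of A's append-to-output-list guarded by a seen-set over a pre-collected token list, B walks the four fields per citation, records each qualifying token's first-occurrence position in a dict via setdefault, and reconstructs first-occurrence order at the end by sorting the dict items by position.
import Mathlib
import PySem

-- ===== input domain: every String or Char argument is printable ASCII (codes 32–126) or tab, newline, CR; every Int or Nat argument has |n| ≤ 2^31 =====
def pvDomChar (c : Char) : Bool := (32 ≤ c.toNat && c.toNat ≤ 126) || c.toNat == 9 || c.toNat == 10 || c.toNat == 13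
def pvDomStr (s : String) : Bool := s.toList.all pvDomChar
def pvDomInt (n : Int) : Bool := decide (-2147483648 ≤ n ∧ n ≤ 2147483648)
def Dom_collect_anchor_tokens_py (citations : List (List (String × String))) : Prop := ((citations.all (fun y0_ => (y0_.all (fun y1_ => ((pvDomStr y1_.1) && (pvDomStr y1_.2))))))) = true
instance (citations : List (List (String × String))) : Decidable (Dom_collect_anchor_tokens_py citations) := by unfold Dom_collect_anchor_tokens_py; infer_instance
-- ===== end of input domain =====

-- B replaces A's ordered output list + seen-set with a dict mapping each token to its
-- first-occurrence position (setdefault keeps the earliest) and a final sort by position;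
-- objective: alternative (dedup order is reconstructed by sorting, not maintained by appending).

-- shared helper: Python's  s.strip().lower()  (both sources contain this exact expression)
def pvNorm (s : String) : String := PySem.Str.lower (PySem.Str.strip s)

-- ===== PORT A =====
-- A's dedup-loop body:  normalized = raw.strip().lower(); skip if len<3 or seen; else record
def pvDedupStep (st : List String × PySem.Set String) (raw : String) :
    List String × PySem.Set String :=
  let normalized := pvNorm raw
  if PySem.Str.len normalized < 3 then st
  else if PySem.Set.contains st.2 normalized then st
  else (st.1 ++ [normalized], PySem.Set.add st.2 normalized)

def collect_anchor_tokens_py (citations : List (List (String × String))) : List String :=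
  let tokens := citations.foldl (fun toks item =>
    let d := PySem.Dict.mk item
    let path := pvNorm (d.getD "path" "")
    let title := pvNorm (d.getD "title" "")
    let sec := pvNorm (d.getD "section" "")
    let sym := pvNorm (d.getD "symbol_name" "")
    let toks := if path ≠ "" then
        toks ++ [path, ((PySem.Str.split? path "/").getD []).getLastD "",
                 ((PySem.Str.split? path "\\").getD []).getLastD ""]
      else toks
    let toks := if title ≠ "" then toks ++ [title] else toks
    let toks := if sec ≠ "" then toks ++ [sec] else toks
    if sym ≠ "" then toks ++ [sym] else toks) []
  (tokens.foldl pvDedupStep ([], PySem.Set.empty)).1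

-- ===== PORT B =====
-- B's candidate-loop body: normalized token of length ≥ 3 gets its first-occurrence
-- position recorded via setdefault; the position counter advances on every candidate
def pvStep (st : PySem.Dict String Int × Int) (cand : String) :
    PySem.Dict String Int × Int :=
  let normalized := pvNorm cand
  (if 3 ≤ PySem.Str.len normalized then st.1.setdefault normalized st.2 else st.1,
   st.2 + 1)

def collect_anchor_tokens_py_alt (citations : List (List (String × String))) : List String :=
  let r := citations.foldl (fun st item =>
    let d := PySem.Dict.mk item
    ["path", "title", "section", "symbol_name"].foldl (fun st field =>
      let value := pvNorm (d.getD field "")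
      if value = "" then st
      else
        let candidates := [value] ++
          (if field = "path" then
            [((PySem.Str.split? value "/").getD []).getLastD "",
             ((PySem.Str.split? value "\\").getD []).getLastD ""]
           else [])
        candidates.foldl pvStep st) st)
    (PySem.Dict.empty, (0 : Int))
  (PySem.List.sorted r.1.items (fun kv => kv.2) false).map Prod.fst

-- ===== PRECONDITION & SPEC =====
def Spec_collect_anchor_tokens_py (citations : List (List (String × String))) (out : List String) : Prop := out = collect_anchor_tokens_py_alt citations
instance (citations : List (List (String × String))) (out : List String) : Decidable (Spec_collect_anchor_tokens_py citations out) := by unfold Spec_collect_anchor_tokens_py; infer_instance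

-- ===== CLAIM (what is proved, stated in full; the proofs are below) =====
def Claim_equal_collect_anchor_tokens_py : Prop := ∀ (citations : List (List (String × String))), Dom_collect_anchor_tokens_py citations → Spec_collect_anchor_tokens_py citations (collect_anchor_tokens_py citations)

-- ===== LEMMAS AND PROOFS =====

-- the per-item candidate list both programs walk (path, '/'-basename, '\'-basename, title, section, symbol_name)
def pvCands (item : List (String × String)) : List String :=
  let d := PySem.Dict.mk item
  let path := pvNorm (d.getD "path" "")
  let title := pvNorm (d.getD "title" "")
  let sec := pvNorm (d.getD "section" "")
  let sym := pvNorm (d.getD "symbol_name" "")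
  (if path ≠ "" then
      [path, ((PySem.Str.split? path "/").getD []).getLastD "",
       ((PySem.Str.split? path "\\").getD []).getLastD ""]
    else []) ++
  (if title ≠ "" then [title] else []) ++
  (if sec ≠ "" then [sec] else []) ++
  (if sym ≠ "" then [sym] else [])

-- A's collection loop builds exactly the concatenation of the per-item candidate lists
theorem pvTokens_eq_flatMap (citations : List (List (String × String))) (acc : List String) :
    citations.foldl (fun toks item =>
      let d := PySem.Dict.mk item
      let path := pvNorm (d.getD "path" "")
      let title := pvNorm (d.getD "title" "")
      let sec := pvNorm (d.getD "section" "")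
      let sym := pvNorm (d.getD "symbol_name" "")
      let toks := if path ≠ "" then
          toks ++ [path, ((PySem.Str.split? path "/").getD []).getLastD "",
                   ((PySem.Str.split? path "\\").getD []).getLastD ""]
        else toks
      let toks := if title ≠ "" then toks ++ [title] else toks
      let toks := if sec ≠ "" then toks ++ [sec] else toks
      if sym ≠ "" then toks ++ [sym] else toks) acc
    = acc ++ citations.flatMap pvCands := by
  have h : (fun (toks : List String) (item : List (String × String)) =>
      let d := PySem.Dict.mk item
      let path := pvNorm (d.getD "path" "")
      let title := pvNorm (d.getD "title" "")
      let sec := pvNorm (d.getD "section" "")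
      let sym := pvNorm (d.getD "symbol_name" "")
      let toks := if path ≠ "" then
          toks ++ [path, ((PySem.Str.split? path "/").getD []).getLastD "",
                   ((PySem.Str.split? path "\\").getD []).getLastD ""]
        else toks
      let toks := if title ≠ "" then toks ++ [title] else toks
      let toks := if sec ≠ "" then toks ++ [sec] else toks
      if sym ≠ "" then toks ++ [sym] else toks)
      = (fun toks item => toks ++ pvCands item) := by
    funext toks item
    simp only [pvCands]
    split_ifs <;> simp
  rw [h, PySem.List.foldl_append_eq_flatMap]

-- B's field loop over one item walks exactly that item's candidate list
theorem pvItem_eq_cands (item : List (String × String)) (st : PySem.Dict String Int × Int) :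
    ["path", "title", "section", "symbol_name"].foldl (fun st field =>
      let value := pvNorm ((PySem.Dict.mk item).getD field "")
      if value = "" then st
      else
        let candidates := [value] ++
          (if field = "path" then
            [((PySem.Str.split? value "/").getD []).getLastD "",
             ((PySem.Str.split? value "\\").getD []).getLastD ""]
           else [])
        candidates.foldl pvStep st) st
    = (pvCands item).foldl pvStep st := by
  simp only [List.foldl, pvCands, List.foldl_append]
  split_ifs <;> simp_all [List.foldl]

-- the two dedup mechanisms agree: A's (output, seen) state is (keys, keys) of B's dict,
-- whose items stay strictly increasing in position and bounded by the counter
theorem pvLoop_inv (l : List String) (first : PySem.Dict String Int) (pos : Int)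
    (hp : first.items.Pairwise (fun a b => a.2 < b.2))
    (hb : ∀ kv ∈ first.items, kv.2 < pos) :
    l.foldl pvDedupStep (first.keys, first.keys)
      = ((l.foldl pvStep (first, pos)).1.keys, (l.foldl pvStep (first, pos)).1.keys)
    ∧ (l.foldl pvStep (first, pos)).1.items.Pairwise (fun a b => a.2 < b.2)
    ∧ ∀ kv ∈ (l.foldl pvStep (first, pos)).1.items, kv.2 < (l.foldl pvStep (first, pos)).2 := by
  induction l generalizing first pos with
  | nil => exact ⟨rfl, hp, hb⟩
  | cons cand l ih =>
    simp only [List.foldl]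
    by_cases hlen : (3 : Int) ≤ PySem.Str.len (pvNorm cand)
    · have hlt : ¬ PySem.Str.len (pvNorm cand) < 3 := not_lt.mpr hlen
      by_cases hc : first.contains (pvNorm cand) = true
      · have hmem : pvNorm cand ∈ first.keys :=
          (PySem.Dict.contains_iff_mem_keys first (pvNorm cand)).mp hc
        have hset : PySem.Set.contains first.keys (pvNorm cand) = true :=
          (PySem.Set.contains_iff first.keys (pvNorm cand)).mpr hmem
        have hA : pvDedupStep (first.keys, first.keys) cand = (first.keys, first.keys) := by
          simp only [pvDedupStep]
          rw [if_neg hlt, if_pos hset]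
        have hB : pvStep (first, pos) cand = (first, pos + 1) := by
          simp only [pvStep]
          rw [if_pos hlen, PySem.Dict.setdefault_of_contains first _ hc]
        rw [hA, hB]
        exact ih first (pos + 1) hp (fun kv h => lt_trans (hb kv h) (by omega))
      · have hc' : first.contains (pvNorm cand) = false := by
          simpa using hc
        have hnmem : pvNorm cand ∉ first.keys := fun h =>
          hc ((PySem.Dict.contains_iff_mem_keys first (pvNorm cand)).mpr h)
        have hsetf : ¬ PySem.Set.contains first.keys (pvNorm cand) = true := fun h =>
          hnmem ((PySem.Set.contains_iff first.keys (pvNorm cand)).mp h)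
        have hA : pvDedupStep (first.keys, first.keys) cand
            = (first.keys ++ [pvNorm cand], first.keys ++ [pvNorm cand]) := by
          simp only [pvDedupStep]
          rw [if_neg hlt, if_neg hsetf, PySem.Set.add_of_not_mem hnmem]
        have hB : pvStep (first, pos) cand = (first.insert (pvNorm cand) pos, pos + 1) := by
          simp only [pvStep]
          rw [if_pos hlen, PySem.Dict.setdefault_of_not_contains first _ hc']
        have hitems : (first.insert (pvNorm cand) pos).items
            = first.items ++ [(pvNorm cand, pos)] :=
          PySem.Dict.items_insert_of_not_contains first _ hc'
        have hkeys : (first.insert (pvNorm cand) pos).keys = first.keys ++ [pvNorm cand] := by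
          simp [PySem.Dict.keys, hitems]
        have hp' : (first.insert (pvNorm cand) pos).items.Pairwise (fun a b => a.2 < b.2) := by
          rw [hitems]
          refine List.pairwise_append.mpr ⟨hp, List.pairwise_singleton _ _, ?_⟩
          intro a ha b hbm
          simp only [List.mem_singleton] at hbm
          subst hbm
          exact hb a ha
        have hb' : ∀ kv ∈ (first.insert (pvNorm cand) pos).items, kv.2 < pos + 1 := by
          rw [hitems]
          intro kv hkv
          rcases List.mem_append.mp hkv with h | h
          · exact lt_trans (hb kv h) (by omega)
          · simp only [List.mem_singleton] at h; subst h; omega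
        rw [hA, hB, ← hkeys]
        exact ih _ (pos + 1) hp' hb'
    · have hA : pvDedupStep (first.keys, first.keys) cand = (first.keys, first.keys) := by
        simp only [pvDedupStep]
        rw [if_pos (not_le.mp hlen)]
      have hB : pvStep (first, pos) cand = (first, pos + 1) := by
        simp only [pvStep]
        rw [if_neg hlen]
      rw [hA, hB]
      exact ih first (pos + 1) hp (fun kv h => lt_trans (hb kv h) (by omega))

-- ===== VERDICT (by name: the statement is the Claim_ definition above) =====
theorem collect_anchor_tokens_py_spec : Claim_equal_collect_anchor_tokens_py := by
  intro citations _
  show collect_anchor_tokens_py citations = collect_anchor_tokens_py_alt citations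
  simp only [collect_anchor_tokens_py, collect_anchor_tokens_py_alt]
  rw [pvTokens_eq_flatMap]
  simp only [List.nil_append]
  have hBflat : citations.foldl (fun st item =>
      let d := PySem.Dict.mk item
      ["path", "title", "section", "symbol_name"].foldl (fun st field =>
        let value := pvNorm (d.getD field "")
        if value = "" then st
        else
          let candidates := [value] ++
            (if field = "path" then
              [((PySem.Str.split? value "/").getD []).getLastD "",
               ((PySem.Str.split? value "\\").getD []).getLastD ""]
             else [])
          candidates.foldl pvStep st) st)
      (PySem.Dict.empty, (0 : Int))
      = (citations.flatMap pvCands).foldl pvStep (PySem.Dict.empty, (0 : Int)) := by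
    rw [List.foldl_flatMap]
    exact (PySem.List.foldl_congr_mem citations _ _ _
      (fun st item _ => pvItem_eq_cands item st))
  rw [hBflat]
  obtain ⟨h1, h2, -⟩ := pvLoop_inv (citations.flatMap pvCands) PySem.Dict.empty 0
    (by simp [PySem.Dict.empty]) (by simp [PySem.Dict.empty])
  have hinit : (([] : List String), (PySem.Set.empty : PySem.Set String))
      = ((PySem.Dict.empty : PySem.Dict String Int).keys,
         (PySem.Dict.empty : PySem.Dict String Int).keys) := by
    rw [PySem.Dict.keys_empty]; rfl
  rw [hinit, h1]
  have hsorted := PySem.List.sorted_eq_of_perm_of_pairwise_lt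
    ((citations.flatMap pvCands).foldl pvStep (PySem.Dict.empty, (0 : Int))).1.items
    ((citations.flatMap pvCands).foldl pvStep (PySem.Dict.empty, (0 : Int))).1.items
    (fun kv => kv.2) (List.Perm.refl _) h2
  rw [hsorted]
  simp [PySem.Dict.keys]
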